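-- pv_equiv track=rewrite | github.com/Ramprasad-Group/PSP | LigParGenPSP/fepzmat.py | read_files
-- ===== SOURCE A (Python) =====
-- def read_files(infile):
--     nline = 0
--     cline = 0
--     oline = 0
--     data = []
--     for line in infile:
--         if line.rstrip():
--             data.append(line)
--             if "Non-Bonded" in line:
--                 oline = nline
--             elif "Variations" in line:
--                 cline = nline
--             nline += 1
--     return data, nline, cline, oline
-- ===== SOURCE B (Python) =====
-- def read_files(infile):
--     data = [line for line in infile if line.rstrip()]
--     nline = len(data)
--     oline = 0
--     cline = 0
--     for i, line in enumerate(data):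
--         if "Non-Bonded" in line:
--             oline = i
--         elif "Variations" in line:
--             cline = i
--     return data, nline, cline, oline
-- ===== Notes on version B (the rewrite author's own statement) =====
-- stated objective: simpler
-- what changed: Replaces A's single loop that interleaves filtering, counting and marker tracking with two passes: a comprehension that filters blank lines (nline = len of the result), followed by an enumerate loop over the filtered data that records the marker indices.
import Mathlib
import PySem

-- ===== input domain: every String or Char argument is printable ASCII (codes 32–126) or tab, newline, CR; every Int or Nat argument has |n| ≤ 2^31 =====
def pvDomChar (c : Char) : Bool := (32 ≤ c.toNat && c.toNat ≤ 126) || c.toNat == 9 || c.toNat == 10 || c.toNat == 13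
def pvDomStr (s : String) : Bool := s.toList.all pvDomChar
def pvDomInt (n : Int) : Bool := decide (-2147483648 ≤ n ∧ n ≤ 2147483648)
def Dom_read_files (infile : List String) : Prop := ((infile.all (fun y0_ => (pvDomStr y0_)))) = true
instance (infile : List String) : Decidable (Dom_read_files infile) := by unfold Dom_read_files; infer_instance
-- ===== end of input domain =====

-- B changes the decomposition only (two passes instead of one interleaved loop); objective: simpler.

-- ===== PORT A =====
-- one loop: filter, count and track markers together, state (nline, cline, oline, data)
def read_files (infile : List String) : List String × Int × Int × Int :=
  let st := infile.foldl
    (fun (st : Int × Int × Int × List String) line =>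
      let (nline, cline, oline, data) := st
      if PySem.Str.rstrip line ≠ "" then
        let data := data ++ [line]
        if PySem.Str.isIn "Non-Bonded" line then
          (nline + 1, cline, nline, data)
        else if PySem.Str.isIn "Variations" line then
          (nline + 1, nline, oline, data)
        else
          (nline + 1, cline, oline, data)
      else st)
    (0, 0, 0, [])
  (st.2.2.2, st.1, st.2.1, st.2.2.1)

-- ===== PORT B =====
-- pass 1: filter blank lines; pass 2: enumerate the filtered data for the marker indices
def read_files_alt (infile : List String) : List String × Int × Int × Int :=
  let data := infile.filter (fun line => PySem.Str.rstrip line ≠ "")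
  let nline : Int := data.length
  let st := (PySem.List.enumerate data).foldl
    (fun (st : Int × Int) (p : Int × String) =>
      let (oline, cline) := st
      if PySem.Str.isIn "Non-Bonded" p.2 then (p.1, cline)
      else if PySem.Str.isIn "Variations" p.2 then (oline, p.1)
      else (oline, cline))
    (0, 0)
  (data, nline, st.2, st.1)

-- ===== PRECONDITION & SPEC =====
def Spec_read_files (infile : List String) (out : List String × Int × Int × Int) : Prop := out = read_files_alt infile
instance (infile : List String) (out : List String × Int × Int × Int) : Decidable (Spec_read_files infile out) := by unfold Spec_read_files; infer_instance

-- ===== CLAIM (what is proved, stated in full; the proofs are below) =====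
def Claim_equal_read_files : Prop := ∀ (infile : List String), Dom_read_files infile → Spec_read_files infile (read_files infile)

-- ===== LEMMAS AND PROOFS =====

-- A's loop body / B's loop body, named for the induction
def pvStepA (st : Int × Int × Int × List String) (line : String) : Int × Int × Int × List String :=
  let (nline, cline, oline, data) := st
  if PySem.Str.rstrip line ≠ "" then
    let data := data ++ [line]
    if PySem.Str.isIn "Non-Bonded" line then
      (nline + 1, cline, nline, data)
    else if PySem.Str.isIn "Variations" line then
      (nline + 1, nline, oline, data)
    else
      (nline + 1, cline, oline, data)
  else st

def pvStepB (st : Int × Int) (p : Int × String) : Int × Int :=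
  let (oline, cline) := st
  if PySem.Str.isIn "Non-Bonded" p.2 then (p.1, cline)
  else if PySem.Str.isIn "Variations" p.2 then (oline, p.1)
  else (oline, cline)

theorem pv_invariant (xs : List String) :
    ∀ (c o : Int) (d : List String),
      xs.foldl pvStepA ((d.length : Int), c, o, d)
        = let f := xs.filter (fun line => PySem.Str.rstrip line ≠ "")
          let st := (PySem.List.enumerate f (d.length : Int)).foldl pvStepB (o, c)
          (((d.length + f.length : Nat) : Int), st.2, st.1, d ++ f) := by
  induction xs with
  | nil => intro c o d; simp [PySem.List.enumerate_nil]
  | cons x xs ih =>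
    intro c o d
    by_cases hx : PySem.Str.rstrip x ≠ ""
    · simp only [List.foldl_cons, List.filter_cons, hx]
      have hxd : decide (PySem.Str.rstrip x ≠ "") = true := by simp [hx]
      by_cases h1 : PySem.Str.isIn "Non-Bonded" x = true
      · have H := ih c ((d.length : Int)) (d ++ [x])
        simp only [List.length_append, List.length_singleton, Nat.cast_add, Nat.cast_one] at H
        simp only [pvStepA, if_pos hx, hxd, if_true, h1, ite_true]
        rw [H]
        simp only [PySem.List.enumerate_cons, List.foldl_cons, pvStepB, h1, ite_true,
          List.length_cons]
        exact Prod.ext (by push_cast; ring) (Prod.ext rfl (Prod.ext rfl (by simp)))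
      · by_cases h2 : PySem.Str.isIn "Variations" x = true
        · have H := ih ((d.length : Int)) o (d ++ [x])
          simp only [List.length_append, List.length_singleton, Nat.cast_add, Nat.cast_one] at H
          simp only [pvStepA, if_pos hx, hxd, if_true, h1, h2, Bool.false_eq_true, ite_false,
            ite_true]
          rw [H]
          simp only [PySem.List.enumerate_cons, List.foldl_cons, pvStepB, h1, h2,
            Bool.false_eq_true, ite_false, ite_true, List.length_cons]
          exact Prod.ext (by push_cast; ring) (Prod.ext rfl (Prod.ext rfl (by simp)))
        · have H := ih c o (d ++ [x])
          simp only [List.length_append, List.length_singleton, Nat.cast_add, Nat.cast_one] at H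
          simp only [pvStepA, if_pos hx, hxd, if_true, h1, h2, Bool.false_eq_true, ite_false]
          rw [H]
          simp only [PySem.List.enumerate_cons, List.foldl_cons, pvStepB, h1, h2,
            Bool.false_eq_true, ite_false, List.length_cons]
          exact Prod.ext (by push_cast; ring) (Prod.ext rfl (Prod.ext rfl (by simp)))
    · simp only [List.foldl_cons, List.filter_cons]
      have hx' : PySem.Str.rstrip x = "" := by simpa using hx
      simp only [pvStepA, hx, ite_false, hx', ne_eq, not_true_eq_false, decide_false,
        Bool.false_eq_true, if_false]
      exact ih c o d

-- ===== VERDICT (by name: the statement is the Claim_ definition above) =====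
theorem read_files_spec : Claim_equal_read_files := by
  intro infile _
  show (let st := infile.foldl pvStepA (0, 0, 0, []); (st.2.2.2, st.1, st.2.1, st.2.2.1)) =
    (let f := infile.filter (fun line => PySem.Str.rstrip line ≠ "")
     let st := (PySem.List.enumerate f (0 : Int)).foldl pvStepB (0, 0)
     (f, (f.length : Int), st.2, st.1))
  have h := pv_invariant infile 0 0 []
  simp only [List.length_nil, Nat.cast_zero, List.nil_append, Nat.zero_add] at h
  simp only [h]
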